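-- pv_equiv track=rewrite | github.com/netra-systems/zen | test_framework/archive_old_large_modules/modular_test_runner.py | _prioritize_tests
-- ===== SOURCE A (Python) =====
-- from typing import List, Dict, Optional, Set, Any
--
-- def _prioritize_tests(tests: Dict[str, List[str]]) -> Dict[str, Dict[str, List[str]]]:
--     """Group tests by priority"""
--     prioritized = {
--         "critical": {},
--         "high": {},
--         "medium": {},
--         "low": {}
--     }
--
--     # Define priority mappings
--     priority_map = {
--         "smoke": "critical",
--         "critical": "critical",
--         "auth": "critical",
--         "database": "high",
--         "api": "high",
--         "unit": "medium",
--         "integration": "medium",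
--         "websocket": "medium",
--         "e2e": "low",
--         "performance": "low"
--     }
--
--     for category, test_list in tests.items():
--         priority = priority_map.get(category, "medium")
--         prioritized[priority][category] = test_list
--
--     return prioritized
-- ===== SOURCE B (Python) =====
-- def _prioritize_tests(tests):
--     """Group tests by priority"""
--     priority_map = {
--         "smoke": "critical",
--         "critical": "critical",
--         "auth": "critical",
--         "database": "high",
--         "api": "high",
--         "unit": "medium",
--         "integration": "medium",
--         "websocket": "medium",
--         "e2e": "low",
--         "performance": "low"
--     }
--     return {
--         level: {category: test_list
--                 for category, test_list in tests.items()
--                 if priority_map.get(category, "medium") == level}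
--         for level in ("critical", "high", "medium", "low")
--     }
-- ===== Notes on version B (the rewrite author's own statement) =====
-- stated objective: idiomatic
-- what changed: Instead of one pass scattering each test into a mutable bucket dict, B builds the result in one dict comprehension: the outer iteration is over the four fixed priority levels, and each bucket is a filtered inner comprehension over the tests whose mapped priority equals that level.
import Mathlib
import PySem

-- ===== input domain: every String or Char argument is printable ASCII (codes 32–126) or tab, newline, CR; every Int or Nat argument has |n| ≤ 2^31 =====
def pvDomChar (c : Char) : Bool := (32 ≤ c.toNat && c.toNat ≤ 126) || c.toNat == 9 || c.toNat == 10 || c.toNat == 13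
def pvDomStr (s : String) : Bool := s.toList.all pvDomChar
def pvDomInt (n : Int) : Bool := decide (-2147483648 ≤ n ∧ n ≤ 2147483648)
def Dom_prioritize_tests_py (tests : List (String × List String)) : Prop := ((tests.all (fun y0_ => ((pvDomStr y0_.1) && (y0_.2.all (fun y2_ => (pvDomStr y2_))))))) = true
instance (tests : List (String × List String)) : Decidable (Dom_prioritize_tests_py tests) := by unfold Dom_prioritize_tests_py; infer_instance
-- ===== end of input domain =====

-- B rebuilds the result as a comprehension over the four fixed priority levels (one filtered inner
-- pass per level) instead of A's single scattering pass into mutable buckets; objective: idiomatic.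

-- shared literal: the priority_map dict both Pythons define verbatim
def pvPriorityMap : PySem.Dict String String := PySem.Dict.ofList
  [("smoke", "critical"), ("critical", "critical"), ("auth", "critical"),
   ("database", "high"), ("api", "high"),
   ("unit", "medium"), ("integration", "medium"), ("websocket", "medium"),
   ("e2e", "low"), ("performance", "low")]

-- ===== PORT A =====
-- `prioritized[priority][category] = test_list` is ported as Dict.modify at `priority`
-- (exact here: `priority` is always one of the four keys present in `prioritized`).
def prioritize_tests_py (tests : List (String × List String)) : List (String × List (String × List String)) :=
  let prioritized : PySem.Dict String (PySem.Dict String (List String)) :=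
    PySem.Dict.ofList
      [("critical", PySem.Dict.empty), ("high", PySem.Dict.empty),
       ("medium", PySem.Dict.empty), ("low", PySem.Dict.empty)]
  let final := tests.foldl
    (fun d ct =>
      let priority := pvPriorityMap.getD ct.1 "medium"
      d.modify priority PySem.Dict.empty (fun inner => inner.insert ct.1 ct.2))
    prioritized
  final.items.map (fun kv => (kv.1, kv.2.items))

-- ===== PORT B =====
-- outer dict comprehension over the four levels; the inner comprehension is the fold of
-- inserts over the tests whose mapped priority equals the level
def prioritize_tests_py_alt (tests : List (String × List String)) : List (String × List (String × List String)) :=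
  ["critical", "high", "medium", "low"].map (fun level =>
    (level,
      (tests.foldl
        (fun inner ct =>
          if pvPriorityMap.getD ct.1 "medium" == level then inner.insert ct.1 ct.2 else inner)
        (PySem.Dict.empty : PySem.Dict String (List String))).items))

-- ===== PRECONDITION & SPEC =====
def Spec_prioritize_tests_py (tests : List (String × List String)) (out : List (String × List (String × List String))) : Prop := out = prioritize_tests_py_alt tests
instance (tests : List (String × List String)) (out : List (String × List (String × List String))) : Decidable (Spec_prioritize_tests_py tests out) := by unfold Spec_prioritize_tests_py; infer_instance

-- ===== CLAIM (what is proved, stated in full; the proofs are below) =====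
def Claim_equal_prioritize_tests_py : Prop := ∀ (tests : List (String × List String)), Dom_prioritize_tests_py tests → Spec_prioritize_tests_py tests (prioritize_tests_py tests)

-- ===== LEMMAS AND PROOFS =====

-- B's per-level bucket, as a fold starting from an arbitrary inner dict
def pvBucket (level : String) (ts : List (String × List String)) (d : PySem.Dict String (List String)) : PySem.Dict String (List String) :=
  ts.foldl
    (fun inner ct =>
      if pvPriorityMap.getD ct.1 "medium" == level then inner.insert ct.1 ct.2 else inner) d

theorem pvPrio_cases (c : String) :
    pvPriorityMap.getD c "medium" = "critical" ∨ pvPriorityMap.getD c "medium" = "high" ∨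
    pvPriorityMap.getD c "medium" = "medium" ∨ pvPriorityMap.getD c "medium" = "low" := by
  have h : pvPriorityMap = PySem.Dict.mk
    [("smoke", "critical"), ("critical", "critical"), ("auth", "critical"),
     ("database", "high"), ("api", "high"),
     ("unit", "medium"), ("integration", "medium"), ("websocket", "medium"),
     ("e2e", "low"), ("performance", "low")] := by decide
  rw [h]
  simp only [PySem.Dict.getD, PySem.Dict.get?, PySem.Dict.items, List.find?]
  repeat' split
  all_goals simp

theorem pvStep (c : String) (tl : List String)
    (d1 d2 d3 d4 : PySem.Dict String (List String)) :
    (PySem.Dict.mk [("critical", d1), ("high", d2), ("medium", d3), ("low", d4)]).modify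
        (pvPriorityMap.getD c "medium") PySem.Dict.empty (fun inner => inner.insert c tl)
    = PySem.Dict.mk
        [("critical", if pvPriorityMap.getD c "medium" == "critical" then d1.insert c tl else d1),
         ("high",     if pvPriorityMap.getD c "medium" == "high"     then d2.insert c tl else d2),
         ("medium",   if pvPriorityMap.getD c "medium" == "medium"   then d3.insert c tl else d3),
         ("low",      if pvPriorityMap.getD c "medium" == "low"      then d4.insert c tl else d4)] := by
  rcases pvPrio_cases c with h | h | h | h <;>
    rw [h] <;>
    simp [PySem.Dict.modify, PySem.Dict.insert, PySem.Dict.contains, PySem.Dict.getD,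
      PySem.Dict.get?, List.find?]

theorem pvMain (ts : List (String × List String))
    (d1 d2 d3 d4 : PySem.Dict String (List String)) :
    ts.foldl
      (fun d ct =>
        d.modify (pvPriorityMap.getD ct.1 "medium") PySem.Dict.empty
          (fun inner => inner.insert ct.1 ct.2))
      (PySem.Dict.mk [("critical", d1), ("high", d2), ("medium", d3), ("low", d4)])
    = PySem.Dict.mk
        [("critical", pvBucket "critical" ts d1), ("high", pvBucket "high" ts d2),
         ("medium", pvBucket "medium" ts d3), ("low", pvBucket "low" ts d4)] := by
  induction ts generalizing d1 d2 d3 d4 with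
  | nil => rfl
  | cons ct ts ih =>
      rcases ct with ⟨c, tl⟩
      simp only [List.foldl_cons]
      rw [pvStep c tl d1 d2 d3 d4, ih]
      rfl

-- ===== VERDICT (by name: the statement is the Claim_ definition above) =====
theorem prioritize_tests_py_spec : Claim_equal_prioritize_tests_py := by
  intro tests _hDom
  show (List.map (fun kv => (kv.1, kv.2.items))
      (List.foldl
        (fun d ct =>
          d.modify (pvPriorityMap.getD ct.1 "medium") PySem.Dict.empty
            (fun inner => inner.insert ct.1 ct.2))
        (PySem.Dict.mk
          [("critical", PySem.Dict.empty), ("high", PySem.Dict.empty),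
           ("medium", PySem.Dict.empty), ("low", PySem.Dict.empty)]) tests).items)
    = prioritize_tests_py_alt tests
  rw [pvMain]
  rfl
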